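-- pv_equiv track=rewrite | github.com/TELangelaar/AdventOfCode | Day5/1.1/main.py | fill_diagram
-- ===== SOURCE A (Python) =====
-- from typing import List
--
-- def fill_diagram(co, dia=None):
--     if dia is None:
--         dia = get_empty_diagram()
--
--     for idx_pair in range(0, len(co)-1, 2):
--         x1, y1 = co[idx_pair][0], co[idx_pair][1]
--         x2, y2 = co[idx_pair + 1][0], co[idx_pair + 1][1]
--
--         if x1 == x2:
--             y_smallest = min(y1, y2)
--             y_biggest = max(y1, y2)
--             ys = [x for x in range(y_smallest, y_biggest + 1)]
--             for y in ys:
--                 if dia[y][x1] == '.':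
--                     dia[y][x1] = '1'
--                 else:
--                     current = int(dia[y][x1])
--                     dia[y][x1] = str(current + 1)
--         elif y1 == y2:
--             x_smallest = min(x1, x2)
--             x_biggest = max(x1, x2)
--             xs = [x for x in range(x_smallest, x_biggest + 1)]
--             for x in xs:
--                 if dia[y1][x] == '.':
--                     dia[y1][x] = '1'
--                 else:
--                     current = int(dia[y1][x])
--                     dia[y1][x] = str(current + 1)
--     return dia
--
-- def get_empty_diagram(size=9) -> [List[List[str]]]:
--     return [['.' for _ in range(0, size + 1)] for _ in range(0, size + 1)]
-- ===== SOURCE B (Python) =====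
-- def fill_diagram(co, dia=None):
--     # Count first, draw once: tally how many segments cover each cell in a
--     # dict, then visit every touched cell a single time and apply the
--     # increment rule as often as it was covered.
--     if dia is None:
--         dia = [['.'] * 10 for _ in range(10)]
--
--     hits = {}
--     for i in range(1, len(co), 2):
--         x1, y1 = co[i - 1][0], co[i - 1][1]
--         x2, y2 = co[i][0], co[i][1]
--         if x1 == x2:
--             for y in range(min(y1, y2), max(y1, y2) + 1):
--                 hits[y, x1] = hits.get((y, x1), 0) + 1
--         elif y1 == y2:
--             for x in range(min(x1, x2), max(x1, x2) + 1):
--                 hits[y1, x] = hits.get((y1, x), 0) + 1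
--
--     for (y, x), n in hits.items():
--         cell = dia[y][x]
--         for _ in range(n):
--             cell = '1' if cell == '.' else str(int(cell) + 1)
--         dia[y][x] = cell
--     return dia
-- ===== Notes on version B (the rewrite author's own statement) =====
-- stated objective: alternative
-- what changed: A walks every segment cell by cell, re-reading, re-parsing and re-writing the grid cell on each visit; B first tallies per-cell coverage counts in one dict pass over the segments and then writes each touched cell exactly once, applying the increment rule as many times as the cell was covered; Pre_ excludes inputs on which A raises (missing coordinate components, out-of-range grid accesses, unparseable touched cells).
import Mathlib
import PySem

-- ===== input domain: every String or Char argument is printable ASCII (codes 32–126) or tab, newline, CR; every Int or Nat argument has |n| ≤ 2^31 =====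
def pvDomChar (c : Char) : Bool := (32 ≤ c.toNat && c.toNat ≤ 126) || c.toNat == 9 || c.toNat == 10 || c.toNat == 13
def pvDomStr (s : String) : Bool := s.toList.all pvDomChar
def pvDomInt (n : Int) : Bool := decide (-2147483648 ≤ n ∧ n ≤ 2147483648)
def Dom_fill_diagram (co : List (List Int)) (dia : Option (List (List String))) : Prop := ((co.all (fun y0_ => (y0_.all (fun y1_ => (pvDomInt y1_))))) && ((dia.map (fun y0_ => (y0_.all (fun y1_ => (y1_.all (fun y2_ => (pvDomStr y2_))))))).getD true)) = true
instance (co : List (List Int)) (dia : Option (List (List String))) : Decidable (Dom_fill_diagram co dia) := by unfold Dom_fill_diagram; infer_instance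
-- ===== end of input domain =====

-- B tallies per-cell coverage counts in one dict pass over the segments and then writes each
-- touched cell once, applying the increment rule as often as the cell was covered; A re-reads,
-- re-parses and re-writes the grid on every single segment cell it visits.  Both mutate the
-- caller's `dia` in Python; the equivalence proved here is about the RETURN value.

-- ===== PORT A =====
def get_empty_diagram_port (size : Int) : List (List String) :=
  (PySem.List.pyRange 0 (size + 1) 1).map (fun _ =>
    (PySem.List.pyRange 0 (size + 1) 1).map (fun _ => "."))

-- one `dia[y][x] = …` update of A's inner loops (the `none` branches are Python raise sites)
def pvTouchA (dia : List (List String)) (y x : Int) : List (List String) :=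
  match PySem.List.pyGet? dia y with
  | none => dia
  | some row =>
    match PySem.List.pyGet? row x with
    | none => dia
    | some v =>
      let nv := if v = "." then "1"
                else PySem.Int.toStr ((PySem.Int.ofStr? v).getD 0 + 1)
      PySem.List.pySetD dia y (PySem.List.pySetD row x nv)

-- the body of A's outer `for idx_pair in range(0, len(co)-1, 2)` loop
def pvStepA (co : List (List Int)) (d : List (List String)) (idx_pair : Int) : List (List String) :=
  match PySem.List.pyGet? co idx_pair, PySem.List.pyGet? co (idx_pair + 1) with
  | some c1, some c2 =>
    match PySem.List.pyGet? c1 0, PySem.List.pyGet? c1 1,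
          PySem.List.pyGet? c2 0, PySem.List.pyGet? c2 1 with
    | some x1, some y1, some x2, some y2 =>
      if x1 = x2 then
        (PySem.List.pyRange (min y1 y2) (max y1 y2 + 1) 1).foldl
          (fun d' y => pvTouchA d' y x1) d
      else if y1 = y2 then
        (PySem.List.pyRange (min x1 x2) (max x1 x2 + 1) 1).foldl
          (fun d' x => pvTouchA d' y1 x) d
      else d
    | _, _, _, _ => d
  | _, _ => d

def fill_diagram (co : List (List Int)) (dia : Option (List (List String))) : List (List String) :=
  let dia0 := match dia with
    | none => get_empty_diagram_port 9
    | some d => d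
  (PySem.List.pyRange 0 (PySem.List.len co - 1) 2).foldl (pvStepA co) dia0

-- ===== PORT B =====
-- the one-cell increment rule: '1' if cell == '.' else str(int(cell) + 1)
def pvNext (v : String) : String :=
  if v = "." then "1" else PySem.Int.toStr ((PySem.Int.ofStr? v).getD 0 + 1)

-- hits[key] = hits.get(key, 0) + 1
def pvBumpB (t : PySem.Dict (Int × Int) Int) (p : Int × Int) : PySem.Dict (Int × Int) Int :=
  t.insert p (t.getD p 0 + 1)

-- the body of B's counting loop `for i in range(1, len(co), 2)`
def pvCountB (co : List (List Int)) (t : PySem.Dict (Int × Int) Int) (i : Int) :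
    PySem.Dict (Int × Int) Int :=
  match PySem.List.pyGet? co (i - 1), PySem.List.pyGet? co i with
  | some c1, some c2 =>
    match PySem.List.pyGet? c1 0, PySem.List.pyGet? c1 1,
          PySem.List.pyGet? c2 0, PySem.List.pyGet? c2 1 with
    | some x1, some y1, some x2, some y2 =>
      if x1 = x2 then
        (PySem.List.pyRange (min y1 y2) (max y1 y2 + 1) 1).foldl
          (fun t' y => pvBumpB t' (y, x1)) t
      else if y1 = y2 then
        (PySem.List.pyRange (min x1 x2) (max x1 x2 + 1) 1).foldl
          (fun t' x => pvBumpB t' (y1, x)) t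
      else t
    | _, _, _, _ => t
  | _, _ => t

-- B's write pass body: read dia[y][x], apply the rule n times, write it back
def pvWriteB (g : List (List String)) (qn : (Int × Int) × Int) : List (List String) :=
  match PySem.List.pyGet? g qn.1.1 with
  | none => g
  | some row =>
    match PySem.List.pyGet? row qn.1.2 with
    | none => g
    | some cell =>
      PySem.List.pySetD g qn.1.1 (PySem.List.pySetD row qn.1.2
        ((PySem.List.pyRange 0 qn.2 1).foldl (fun c _ => pvNext c) cell))

def fill_diagram_alt (co : List (List Int)) (dia : Option (List (List String))) : List (List String) :=
  let g := match dia with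
    | none => (PySem.List.pyRange 0 10 1).map (fun _ => PySem.List.pyRepeat ["."] 10)
    | some d => d
  let hits := (PySem.List.pyRange 1 (PySem.List.len co) 2).foldl (pvCountB co) PySem.Dict.empty
  hits.items.foldl pvWriteB g

-- ===== PRECONDITION & SPEC =====
-- the grid A works on (the given dia, or the default 10×10 grid of '.')
def pvGrid (dia : Option (List (List String))) : List (List String) :=
  match dia with
  | none => get_empty_diagram_port 9
  | some d => d

-- the access dia[y][x] is in range and the cell holds '.' or an int()-parseable string
def cellPreB (g : List (List String)) (y x : Int) : Bool :=
  match PySem.List.pyGet? g y with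
  | none => false
  | some row =>
    match PySem.List.pyGet? row x with
    | none => false
    | some v => v == "." || (PySem.Int.ofStr? v).isSome

def pairPreB (g : List (List String)) (c1 c2 : List Int) : Bool :=
  match PySem.List.pyGet? c1 0, PySem.List.pyGet? c1 1,
        PySem.List.pyGet? c2 0, PySem.List.pyGet? c2 1 with
  | some x1, some y1, some x2, some y2 =>
    if x1 = x2 then
      (PySem.List.pyRange (min y1 y2) (max y1 y2 + 1) 1).all (fun y => cellPreB g y x1)
    else if y1 = y2 then
      (PySem.List.pyRange (min x1 x2) (max x1 x2 + 1) 1).all (fun x => cellPreB g y1 x)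
    else true
  | _, _, _, _ => false

def pairCheck (g : List (List String)) (co : List (List Int)) (k : Int) : Bool :=
  match PySem.List.pyGet? co k, PySem.List.pyGet? co (k + 1) with
  | some c1, some c2 => pairPreB g c1 c2
  | _, _ => false

-- Pre_: exactly the inputs on which A returns normally — every processed coordinate
-- pair has both components, every grid access of the drawn segments is in range
-- (Python's negative wraparound included), and every cell a segment touches
-- holds '.' or an int()-parseable string (otherwise A raises IndexError/ValueError).
def Pre_fill_diagram (co : List (List Int)) (dia : Option (List (List String))) : Prop :=
  ((PySem.List.pyRange 0 (PySem.List.len co - 1) 2).all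
    (fun k => pairCheck (pvGrid dia) co k)) = true

instance (co : List (List Int)) (dia : Option (List (List String))) : Decidable (Pre_fill_diagram co dia) := by
  unfold Pre_fill_diagram; infer_instance

def pvWitness_fill_diagram : List (List Int) × Option (List (List String)) :=
  ([[0, 0], [2, 0], [1, 0], [1, 2]], none)

def Spec_fill_diagram (co : List (List Int)) (dia : Option (List (List String))) (out : List (List String)) : Prop := out = fill_diagram_alt co dia
instance (co : List (List Int)) (dia : Option (List (List String))) (out : List (List String)) : Decidable (Spec_fill_diagram co dia out) := by unfold Spec_fill_diagram; infer_instance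

-- ===== CLAIM (what is proved, stated in full; the proofs are below) =====
def Claim_equal_fill_diagram : Prop := ∀ (co : List (List Int)) (dia : Option (List (List String))), Dom_fill_diagram co dia → Pre_fill_diagram co dia → Spec_fill_diagram co dia (fill_diagram co dia)

-- ===== LEMMAS AND PROOFS =====

-- cell-level view of a grid at a (non-negative, normalised) position
def cellI (g : List (List String)) (p : Int × Int) : String :=
  PySem.List.pyGetD (PySem.List.pyGetD g p.1 []) p.2 ""

def inRangeP (g : List (List String)) (p : Int × Int) : Prop :=
  0 ≤ p.1 ∧ p.1 < (g.length : Int) ∧ 0 ≤ p.2 ∧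
    p.2 < ((PySem.List.pyGetD g p.1 []).length : Int)

-- write value v at the (normalised) position p
def pvWriteAt (g : List (List String)) (p : Int × Int) (v : String) : List (List String) :=
  PySem.List.pySetD g p.1
    (PySem.List.pySetD (PySem.List.pyGetD g p.1 []) p.2 v)

-- the one-touch update of A, expressed at a normalised position
def pvApply (g : List (List String)) (p : Int × Int) : List (List String) :=
  pvWriteAt g p (pvNext (cellI g p))

-- a raw read-modify-write of dia[y][x] with an arbitrary cell function F
def pvRawUpd (F : String → String) (g : List (List String)) (y x : Int) : List (List String) :=
  match PySem.List.pyGet? g y with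
  | none => g
  | some row =>
    match PySem.List.pyGet? row x with
    | none => g
    | some v => PySem.List.pySetD g y (PySem.List.pySetD row x (F v))

def shapeG (g : List (List String)) : List Nat := g.map List.length

-- key = (y mod len(dia), x mod len(dia[y mod len(dia)])): the cell Python's wraparound hits
def pvKeyB (g : List (List String)) (y x : Int) : Int × Int :=
  (PySem.Int.mod y (PySem.List.len g),
   PySem.Int.mod x (PySem.List.len
     (PySem.List.pyGetD g (PySem.Int.mod y (PySem.List.len g)) [])))

-- the raw (y, x) pairs a coordinate pair touches, in visiting order
def rawKeysAt (co : List (List Int)) (k : Int) : List (Int × Int) :=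
  match PySem.List.pyGet? co k, PySem.List.pyGet? co (k + 1) with
  | some c1, some c2 =>
    match PySem.List.pyGet? c1 0, PySem.List.pyGet? c1 1,
          PySem.List.pyGet? c2 0, PySem.List.pyGet? c2 1 with
    | some x1, some y1, some x2, some y2 =>
      if x1 = x2 then
        (PySem.List.pyRange (min y1 y2) (max y1 y2 + 1) 1).map (fun y => (y, x1))
      else if y1 = y2 then
        (PySem.List.pyRange (min x1 x2) (max x1 x2 + 1) 1).map (fun x => (y1, x))
      else []
    | _, _, _, _ => []
  | _, _ => []

-- the same cells, normalised, in A's visiting order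
def pvKeysAt (g : List (List String)) (co : List (List Int)) (k : Int) : List (Int × Int) :=
  (rawKeysAt co k).map (fun q => pvKeyB g q.1 q.2)

def rawTouchList (co : List (List Int)) : List (Int × Int) :=
  (PySem.List.pyRange 0 (PySem.List.len co - 1) 2).flatMap (rawKeysAt co)

-- ---- arithmetic of Python's wraparound index ----
theorem pvModEmod (i b : Int) (hb : 0 < b) : PySem.Int.mod i b = i % b := by
  unfold PySem.Int.mod
  rw [Int.fmod_eq_emod, if_pos (Or.inl (le_of_lt hb)), add_zero]

theorem pvMod_small (i b : Int) (h0 : 0 ≤ i) (h2 : i < b) : PySem.Int.mod i b = i := by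
  rw [pvModEmod i b (by omega)]
  exact Int.emod_eq_of_lt h0 h2

theorem pvMod_neg (i b : Int) (h1 : -b ≤ i) (h0 : i < 0) : PySem.Int.mod i b = i + b := by
  rw [pvModEmod i b (by omega)]
  have h3 : (i + b) % b = i % b := by
    have h4 := Int.add_mul_emod_self_left (a := i) (b := b) (c := 1)
    simp only [mul_one] at h4
    exact h4
  rw [← h3]
  exact Int.emod_eq_of_lt (by omega) (by omega)

theorem pvMod_range (n : Nat) (i : Int) (h1 : -(n : Int) ≤ i) (h2 : i < (n : Int)) :
    0 ≤ PySem.Int.mod i (n : Int) ∧ PySem.Int.mod i (n : Int) < (n : Int) := by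
  by_cases h0 : 0 ≤ i
  · rw [pvMod_small i _ h0 h2]; omega
  · rw [pvMod_neg i _ h1 (by omega)]; omega

theorem pvIdx_eq_mod (n : Nat) (i : Int) (h1 : -(n : Int) ≤ i) (h2 : i < (n : Int)) :
    PySem.List.pyIdx? n i = some ((PySem.Int.mod i (n : Int)).toNat) := by
  unfold PySem.List.pyIdx?
  by_cases h0 : 0 ≤ i
  · rw [if_pos h0, if_pos h2, pvMod_small i _ h0 h2]
  · rw [if_neg h0, if_pos h1, pvMod_neg i _ h1 (by omega)]
    simp only [Option.some.injEq]
    omega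

theorem pvGet_norm {α : Type} (g : List α) (i : Int)
    (h1 : -(g.length : Int) ≤ i) (h2 : i < (g.length : Int)) :
    PySem.List.pyGet? g i = g[(PySem.Int.mod i (g.length : Int)).toNat]? := by
  unfold PySem.List.pyGet?
  rw [pvIdx_eq_mod _ _ h1 h2]
  rfl

theorem pvGetD_norm {α : Type} (g : List α) (i : Int) (d : α)
    (h1 : -(g.length : Int) ≤ i) (h2 : i < (g.length : Int)) :
    PySem.List.pyGetD g i d = g.getD (PySem.Int.mod i (g.length : Int)).toNat d := by
  unfold PySem.List.pyGetD
  rw [pvGet_norm g i h1 h2]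
  rw [List.getD_eq_getElem?_getD]

theorem pvSetD_norm {α : Type} (g : List α) (i : Int) (v : α)
    (h1 : -(g.length : Int) ≤ i) (h2 : i < (g.length : Int)) :
    PySem.List.pySetD g i v = g.set (PySem.Int.mod i (g.length : Int)).toNat v := by
  unfold PySem.List.pySetD PySem.List.pySet?
  rw [pvIdx_eq_mod _ _ h1 h2]
  rfl

theorem pvGet_some_range {α : Type} (g : List α) (i : Int) (x : α)
    (h : PySem.List.pyGet? g i = some x) :
    -(g.length : Int) ≤ i ∧ i < (g.length : Int) := by
  by_contra hc
  rw [not_and_or] at hc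
  have : PySem.List.pyGet? g i = none := by
    unfold PySem.List.pyGet? PySem.List.pyIdx?
    rcases hc with hc | hc
    · rw [if_neg (by omega), if_neg (by omega)]; rfl
    · rw [if_pos (by omega), if_neg (by omega)]; rfl
  rw [this] at h
  exact absurd h (by simp)

-- ---- shapes ----
theorem pvShape_length (g g' : List (List String)) (h : shapeG g' = shapeG g) :
    g'.length = g.length := by
  have := congrArg List.length h
  simpa [shapeG] using this

theorem pvShape_row (g g' : List (List String)) (h : shapeG g' = shapeG g) (r : Nat) :
    (g'.getD r []).length = (g.getD r []).length := by
  have hl := pvShape_length g g' h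
  by_cases hr : r < g.length
  · have hr' : r < g'.length := by omega
    have hq : (g'[r]?).map List.length = (g[r]?).map List.length := by
      have := congrArg (fun l => l[r]?) h
      simpa [shapeG] using this
    rw [List.getElem?_eq_getElem hr', List.getElem?_eq_getElem hr] at hq
    simp only [Option.map_some, Option.some.injEq] at hq
    rw [List.getD_eq_getElem _ _ hr', List.getD_eq_getElem _ _ hr]
    exact hq
  · rw [List.getD_eq_default _ _ (by omega), List.getD_eq_default _ _ (by omega)]

theorem pvIdx_lt (n : Nat) (i : Int) (k : Nat) (h : PySem.List.pyIdx? n i = some k) :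
    k < n := by
  unfold PySem.List.pyIdx? at h
  split_ifs at h <;> simp_all <;> omega

theorem pvGetD_len_shape (g g' : List (List String)) (hsh : shapeG g' = shapeG g) (i : Int) :
    (PySem.List.pyGetD g' i []).length = (PySem.List.pyGetD g i []).length := by
  have hl := pvShape_length g g' hsh
  unfold PySem.List.pyGetD PySem.List.pyGet?
  rw [hl]
  cases hk : PySem.List.pyIdx? g.length i with
  | none => rfl
  | some k =>
    have hkn := pvIdx_lt _ _ _ hk
    simp only [Option.bind_some]
    rw [List.getElem?_eq_getElem (show k < g'.length by omega),
        List.getElem?_eq_getElem hkn]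
    simp only [Option.getD_some]
    have := pvShape_row g g' hsh k
    rw [List.getD_eq_getElem _ _ (show k < g'.length by omega),
        List.getD_eq_getElem _ _ hkn] at this
    exact this

theorem pvShape_set (g : List (List String)) (k : Nat) (row : List String)
    (hlen : row.length = (g.getD k []).length) :
    shapeG (g.set k row) = shapeG g := by
  unfold shapeG
  rw [List.map_set]
  by_cases hk : k < g.length
  · rw [hlen, List.getD_eq_getElem _ _ hk]
    apply List.ext_getElem
    · simp
    · intro n hn1 hn2
      simp only [List.getElem_set]
      split
      · subst n; simp
      · rfl
  · rw [List.set_eq_of_length_le (by simpa using (by omega : g.length ≤ k))]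

-- inRangeP only depends on the shape
theorem pvInRange_shape (g g' : List (List String)) (h : shapeG g' = shapeG g)
    (p : Int × Int) (hp : inRangeP g p) : inRangeP g' p := by
  obtain ⟨hp1, hp2, hp3, hp4⟩ := hp
  have hl := pvShape_length g g' h
  refine ⟨hp1, by omega, hp3, ?_⟩
  rw [pvGetD_len_shape g g' h p.1]
  exact hp4

-- ---- the single write at a normalised position ----
theorem pvCell_write (g : List (List String)) (q : Int × Int) (hq : inRangeP g q)
    (w : String) (p : Int × Int) (hp1 : 0 ≤ p.1) (hp2 : 0 ≤ p.2) :
    cellI (pvWriteAt g q w) p = if p = q then w else cellI g p := by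
  obtain ⟨hq1, hq2, hq3, hq4⟩ := hq
  set row := PySem.List.pyGetD g q.1 [] with hrow
  have happly : pvWriteAt g q w = g.set q.1.toNat (row.set q.2.toNat w) := by
    unfold pvWriteAt
    rw [← hrow]
    rw [pvSetD_norm row q.2 w (by omega) (by omega), pvMod_small _ _ hq3 (by omega)]
    rw [pvSetD_norm g q.1 _ (by omega) (by omega), pvMod_small _ _ hq1 hq2]
  rw [happly]
  unfold cellI
  by_cases hr : p.1 = q.1
  · rw [hr]
    have e1 : PySem.List.pyGetD (g.set q.1.toNat (row.set q.2.toNat w)) q.1 [] =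
        row.set q.2.toNat w := by
      rw [pvGetD_norm _ q.1 [] (by simp only [List.length_set]; omega)
            (by simp only [List.length_set]; omega)]
      rw [pvMod_small _ _ hq1 (by simp only [List.length_set]; omega)]
      rw [List.getD_eq_getElem _ _ (by simp only [List.length_set]; omega)]
      rw [List.getElem_set_self (by simp only [List.length_set]; omega)]
    rw [e1, ← hrow]
    by_cases hc : p.2 = q.2
    · rw [hc]
      have hpq : p = q := by
        cases p; cases q; simp_all
      rw [if_pos hpq]
      rw [pvGetD_norm _ q.2 "" (by simp only [List.length_set]; omega)
            (by simp only [List.length_set]; omega)]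
      rw [pvMod_small _ _ hq3 (by simp only [List.length_set]; omega)]
      rw [List.getD_eq_getElem _ _ (by simp only [List.length_set]; omega)]
      rw [List.getElem_set_self (by simp only [List.length_set]; omega)]
    · have hne : p ≠ q := fun he => hc (by rw [he])
      rw [if_neg hne]
      by_cases hcr : p.2 < (row.length : Int)
      · rw [pvGetD_norm _ p.2 "" (by simp only [List.length_set]; omega)
              (by simp only [List.length_set]; omega)]
        rw [pvMod_small _ _ hp2 (by simp only [List.length_set]; omega)]
        rw [pvGetD_norm row p.2 "" (by omega) hcr]
        rw [pvMod_small _ _ hp2 hcr]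
        rw [List.getD_eq_getElem?_getD, List.getD_eq_getElem?_getD]
        rw [List.getElem?_set_ne (by omega)]
      · have o1 : PySem.List.pyGetD (row.set q.2.toNat w) p.2 "" = "" := by
          unfold PySem.List.pyGetD PySem.List.pyGet? PySem.List.pyIdx?
          rw [if_pos hp2, if_neg (by simp only [List.length_set]; omega)]
          rfl
        have o2 : PySem.List.pyGetD row p.2 "" = "" := by
          unfold PySem.List.pyGetD PySem.List.pyGet? PySem.List.pyIdx?
          rw [if_pos hp2, if_neg (by omega)]
          rfl
        rw [o1, o2]
  · have hne : p ≠ q := fun he => hr (by rw [he])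
    rw [if_neg hne]
    have e1 : PySem.List.pyGetD (g.set q.1.toNat (row.set q.2.toNat w)) p.1 [] =
        PySem.List.pyGetD g p.1 [] := by
      by_cases hin : p.1 < (g.length : Int)
      · rw [pvGetD_norm _ p.1 [] (by simp only [List.length_set]; omega)
              (by simp only [List.length_set]; omega)]
        rw [pvMod_small _ _ hp1 (by simp only [List.length_set]; omega)]
        rw [pvGetD_norm g p.1 [] (by omega) hin]
        rw [pvMod_small _ _ hp1 hin]
        rw [List.getD_eq_getElem?_getD, List.getD_eq_getElem?_getD]
        rw [List.getElem?_set_ne (by omega)]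
      · have o1 : PySem.List.pyGetD (g.set q.1.toNat (row.set q.2.toNat w)) p.1 [] = [] := by
          unfold PySem.List.pyGetD PySem.List.pyGet? PySem.List.pyIdx?
          rw [if_pos hp1, if_neg (by simp only [List.length_set]; omega)]
          rfl
        have o2 : PySem.List.pyGetD g p.1 [] = [] := by
          unfold PySem.List.pyGetD PySem.List.pyGet? PySem.List.pyIdx?
          rw [if_pos hp1, if_neg (by omega)]
          rfl
        rw [o1, o2]
    rw [e1]

theorem pvShape_write (g : List (List String)) (q : Int × Int) (w : String) :
    shapeG (pvWriteAt g q w) = shapeG g := by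
  unfold pvWriteAt
  set R := PySem.List.pySetD (PySem.List.pyGetD g q.1 []) q.2 w with hR
  unfold PySem.List.pySetD PySem.List.pySet?
  cases hk : PySem.List.pyIdx? g.length q.1 with
  | none => rfl
  | some k =>
    simp only [Option.map_some, Option.getD_some]
    apply pvShape_set
    rw [hR, PySem.List.length_pySetD]
    unfold PySem.List.pyGetD PySem.List.pyGet?
    rw [hk]
    simp only [Option.bind_some]
    rw [List.getD_eq_getElem?_getD]

theorem pvShape_apply (g : List (List String)) (q : Int × Int) :
    shapeG (pvApply g q) = shapeG g := pvShape_write g q _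

theorem pvShape_foldl (T : List (Int × Int)) (g : List (List String)) :
    shapeG (T.foldl pvApply g) = shapeG g := by
  induction T generalizing g with
  | nil => rfl
  | cons q T ih =>
    rw [List.foldl_cons, ih, pvShape_apply]

-- ---- the counting lemma: A's fold of touches is an iterate per cell ----
theorem pvFold_cell (T : List (Int × Int)) (g : List (List String))
    (hT : ∀ p ∈ T, inRangeP g p) (p : Int × Int) (hp1 : 0 ≤ p.1) (hp2 : 0 ≤ p.2) :
    cellI (T.foldl pvApply g) p = pvNext^[T.count p] (cellI g p) := by
  induction T generalizing g with
  | nil => rfl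
  | cons q T ih =>
    have hq : inRangeP g q := hT q (by simp)
    have hT' : ∀ r ∈ T, inRangeP (pvApply g q) r := by
      intro r hr
      exact pvInRange_shape g _ (pvShape_apply g q) r (hT r (by simp [hr]))
    rw [List.foldl_cons, ih _ hT']
    rw [show pvApply g q = pvWriteAt g q (pvNext (cellI g q)) from rfl]
    rw [pvCell_write g q hq _ p hp1 hp2]
    by_cases hpq : p = q
    · subst hpq
      rw [if_pos rfl, List.count_cons_self]
      rw [← Function.iterate_succ_apply]
    · rw [if_neg hpq, List.count_cons_of_ne (Ne.symm hpq)]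

-- ---- Pre_ gives validity and the raw/normalised correspondence ----
theorem pvCellPre_parts (g : List (List String)) (y x : Int) (h : cellPreB g y x = true) :
    ∃ row v, PySem.List.pyGet? g y = some row ∧ PySem.List.pyGet? row x = some v := by
  unfold cellPreB at h
  cases hg : PySem.List.pyGet? g y with
  | none => rw [hg] at h; exact absurd h (by simp)
  | some row =>
    rw [hg] at h
    cases hr : PySem.List.pyGet? row x with
    | none =>
      have h2 : (match PySem.List.pyGet? row x with
        | none => false
        | some v => v == "." || (PySem.Int.ofStr? v).isSome) = true := h
      rw [hr] at h2
      exact absurd h2 (by simp)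
    | some v => exact ⟨row, v, rfl, hr⟩

theorem pvKey_inRange (g : List (List String)) (y x : Int) (h : cellPreB g y x = true) :
    inRangeP g (pvKeyB g y x) := by
  obtain ⟨row, v, hg, hr⟩ := pvCellPre_parts g y x h
  have hgy := pvGet_some_range g y row hg
  have hrx := pvGet_some_range row x v hr
  have hmy := pvMod_range g.length y hgy.1 hgy.2
  unfold pvKeyB inRangeP
  simp only [PySem.List.len_eq]
  have hrow : PySem.List.pyGetD g (PySem.Int.mod y (g.length : Int)) [] = row := by
    rw [pvGetD_norm g _ [] (by omega) (by omega), pvMod_small _ _ hmy.1 hmy.2]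
    have h2 : PySem.List.pyGetD g y [] = row := by
      unfold PySem.List.pyGetD; rw [hg]; rfl
    rw [pvGetD_norm g y [] hgy.1 hgy.2] at h2
    exact h2
  rw [hrow]
  have hmx := pvMod_range row.length x hrx.1 hrx.2
  exact ⟨hmy.1, hmy.2, hmx.1, hmx.2⟩

theorem pvRawUpd_eq (F : String → String) (g g' : List (List String))
    (hsh : shapeG g' = shapeG g) (y x : Int) (h : cellPreB g y x = true) :
    pvRawUpd F g' y x = pvWriteAt g' (pvKeyB g y x) (F (cellI g' (pvKeyB g y x))) := by
  obtain ⟨row, v, hg, hr⟩ := pvCellPre_parts g y x h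
  have hgy := pvGet_some_range g y row hg
  have hrx := pvGet_some_range row x v hr
  have hl := pvShape_length g g' hsh
  have hmy := pvMod_range g.length y hgy.1 hgy.2
  set m1 := PySem.Int.mod y (g.length : Int) with hm1
  have hm1' : PySem.Int.mod y (g'.length : Int) = m1 := by
    rw [show (g'.length : Int) = (g.length : Int) from by omega]
  have hrowg : PySem.List.pyGetD g y [] = row := by
    unfold PySem.List.pyGetD; rw [hg]; rfl
  have hrowg_norm : g.getD m1.toNat [] = row := by
    have h2 := hrowg
    rw [pvGetD_norm g y [] hgy.1 hgy.2, ← hm1] at h2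
    exact h2
  have hrow_m1 : PySem.List.pyGetD g m1 [] = row := by
    rw [pvGetD_norm g m1 [] (by omega) (by omega)]
    rw [pvMod_small m1 _ hmy.1 hmy.2]
    exact hrowg_norm
  set row' := g'.getD m1.toNat [] with hrowdef
  have hrow'_len : row'.length = row.length := by
    rw [hrowdef, pvShape_row g g' hsh, hrowg_norm]
  have hget' : PySem.List.pyGet? g' y = some row' := by
    rw [pvGet_norm g' y (by omega) (by omega), hm1']
    rw [List.getElem?_eq_getElem (by omega)]
    rw [hrowdef, List.getD_eq_getElem _ _ (by omega)]
  have hrow'_m1 : PySem.List.pyGetD g' m1 [] = row' := by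
    rw [pvGetD_norm g' m1 [] (by omega) (by omega)]
    rw [pvMod_small _ _ hmy.1 (by omega)]
  have hmx := pvMod_range row.length x hrx.1 hrx.2
  set m2 := PySem.Int.mod x (row.length : Int) with hm2
  have hm2' : PySem.Int.mod x (row'.length : Int) = m2 := by rw [hrow'_len, ← hm2]
  have hkey : pvKeyB g y x = (m1, m2) := by
    unfold pvKeyB
    simp only [PySem.List.len_eq, ← hm1]
    rw [hrow_m1, ← hm2]
  set v' := row'.getD m2.toNat "" with hv'def
  have hv' : PySem.List.pyGet? row' x = some v' := by
    rw [pvGet_norm row' x (by omega) (by omega), hm2']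
    rw [List.getElem?_eq_getElem (by omega)]
    rw [hv'def, List.getD_eq_getElem _ _ (by omega)]
  have hcell : cellI g' (m1, m2) = v' := by
    unfold cellI
    simp only
    rw [hrow'_m1, pvGetD_norm row' m2 "" (by omega) (by omega)]
    rw [pvMod_small m2 _ hmx.1 (by omega)]
  have hsetrow : PySem.List.pySetD row' x (F v') = row'.set m2.toNat (F v') := by
    rw [pvSetD_norm row' x _ (by omega) (by omega), hm2']
  have hsetrow2 : PySem.List.pySetD row' m2 (F v') = row'.set m2.toNat (F v') := by
    rw [pvSetD_norm row' m2 _ (by omega) (by omega)]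
    rw [pvMod_small m2 _ hmx.1 (by omega)]
  have hsetg : PySem.List.pySetD g' y (row'.set m2.toNat (F v')) =
      g'.set m1.toNat (row'.set m2.toNat (F v')) := by
    rw [pvSetD_norm g' y _ (by omega) (by omega), hm1']
  have hsetg2 : PySem.List.pySetD g' m1 (row'.set m2.toNat (F v')) =
      g'.set m1.toNat (row'.set m2.toNat (F v')) := by
    rw [pvSetD_norm g' m1 _ (by omega) (by omega)]
    rw [pvMod_small m1 _ hmy.1 (by omega)]
  simp only [pvRawUpd, hget', hv']
  unfold pvWriteAt
  rw [hkey]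
  simp only
  rw [hrow'_m1, hcell, hsetrow, hsetg, hsetrow2, hsetg2]

-- A's touch is the raw update with F = pvNext
theorem pvTouch_eq_apply (g g' : List (List String)) (hsh : shapeG g' = shapeG g)
    (y x : Int) (h : cellPreB g y x = true) :
    pvTouchA g' y x = pvApply g' (pvKeyB g y x) := by
  have : pvTouchA g' y x = pvRawUpd pvNext g' y x := by
    unfold pvTouchA pvRawUpd pvNext
    rfl
  rw [this, pvRawUpd_eq pvNext g g' hsh y x h]
  rfl

-- ---- segment folds: A's inner loops are folds of pvApply over the key list ----
theorem pvSeg_v (g : List (List String)) (x1 : Int) (ys : List Int) :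
    ∀ g', shapeG g' = shapeG g → (∀ y ∈ ys, cellPreB g y x1 = true) →
      ys.foldl (fun d' y => pvTouchA d' y x1) g' =
        (ys.map (fun y => pvKeyB g y x1)).foldl pvApply g' := by
  induction ys with
  | nil => intro g' _ _; rfl
  | cons y ys ih =>
    intro g' hsh hall
    rw [List.foldl_cons, List.map_cons, List.foldl_cons]
    rw [pvTouch_eq_apply g g' hsh y x1 (hall y (by simp))]
    exact ih _ (by rw [pvShape_apply, hsh]) (fun z hz => hall z (by simp [hz]))

theorem pvSeg_h (g : List (List String)) (y1 : Int) (xs : List Int) :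
    ∀ g', shapeG g' = shapeG g → (∀ x ∈ xs, cellPreB g y1 x = true) →
      xs.foldl (fun d' x => pvTouchA d' y1 x) g' =
        (xs.map (fun x => pvKeyB g y1 x)).foldl pvApply g' := by
  induction xs with
  | nil => intro g' _ _; rfl
  | cons x xs ih =>
    intro g' hsh hall
    rw [List.foldl_cons, List.map_cons, List.foldl_cons]
    rw [pvTouch_eq_apply g g' hsh y1 x (hall x (by simp))]
    exact ih _ (by rw [pvShape_apply, hsh]) (fun z hz => hall z (by simp [hz]))

-- ---- A's outer loop ----
theorem pvStepA_eq (g g' : List (List String)) (co : List (List Int)) (k : Int)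
    (hsh : shapeG g' = shapeG g) (hck : pairCheck g co k = true) :
    pvStepA co g' k = (pvKeysAt g co k).foldl pvApply g' := by
  cases h1 : PySem.List.pyGet? co k with
  | none => simp [pairCheck, h1] at hck
  | some c1 =>
    cases h2 : PySem.List.pyGet? co (k + 1) with
    | none => simp [pairCheck, h1, h2] at hck
    | some c2 =>
      simp only [pairCheck, h1, h2] at hck
      cases h3 : PySem.List.pyGet? c1 0 with
      | none => simp [pairPreB, h3] at hck
      | some x1 =>
        cases h4 : PySem.List.pyGet? c1 1 with
        | none => simp [pairPreB, h3, h4] at hck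
        | some y1 =>
          cases h5 : PySem.List.pyGet? c2 0 with
          | none => simp [pairPreB, h3, h4, h5] at hck
          | some x2 =>
            cases h6 : PySem.List.pyGet? c2 1 with
            | none => simp [pairPreB, h3, h4, h5, h6] at hck
            | some y2 =>
              simp only [pairPreB, h3, h4, h5, h6] at hck
              simp only [pvStepA, pvKeysAt, rawKeysAt, h1, h2, h3, h4, h5, h6]
              by_cases hx : x1 = x2
              · rw [if_pos hx] at hck ⊢
                rw [if_pos hx, List.map_map]
                exact pvSeg_v g x1 _ g' hsh (fun y hy => (List.all_eq_true.mp hck) y hy)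
              · rw [if_neg hx] at hck ⊢
                rw [if_neg hx]
                by_cases hy : y1 = y2
                · rw [if_pos hy] at hck ⊢
                  rw [if_pos hy, List.map_map]
                  exact pvSeg_h g y1 _ g' hsh (fun z hz => (List.all_eq_true.mp hck) z hz)
                · rw [if_neg hy] at hck ⊢
                  rw [if_neg hy]
                  rfl

theorem pvFoldA_eq (g : List (List String)) (co : List (List Int)) (ks : List Int) :
    ∀ g', shapeG g' = shapeG g → (∀ k ∈ ks, pairCheck g co k = true) →
      ks.foldl (pvStepA co) g' = (ks.flatMap (pvKeysAt g co)).foldl pvApply g' := by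
  induction ks with
  | nil => intro g' _ _; rfl
  | cons k ks ih =>
    intro g' hsh hall
    rw [List.foldl_cons, List.flatMap_cons, List.foldl_append]
    rw [pvStepA_eq g g' co k hsh (hall k (by simp))]
    exact ih _ (by rw [pvShape_foldl, hsh]) (fun z hz => hall z (by simp [hz]))

-- ---- membership in the raw touch list gives a checked cell ----
theorem rawKeysAt_valid (g : List (List String)) (co : List (List Int)) (k : Int)
    (hck : pairCheck g co k = true) :
    ∀ q ∈ rawKeysAt co k, cellPreB g q.1 q.2 = true := by
  cases h1 : PySem.List.pyGet? co k with
  | none => simp [rawKeysAt, h1]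
  | some c1 =>
    cases h2 : PySem.List.pyGet? co (k + 1) with
    | none => simp [rawKeysAt, h1, h2]
    | some c2 =>
      simp only [pairCheck, h1, h2] at hck
      cases h3 : PySem.List.pyGet? c1 0 with
      | none => simp [pairPreB, h3] at hck
      | some x1 =>
        cases h4 : PySem.List.pyGet? c1 1 with
        | none => simp [pairPreB, h3, h4] at hck
        | some y1 =>
          cases h5 : PySem.List.pyGet? c2 0 with
          | none => simp [pairPreB, h3, h4, h5] at hck
          | some x2 =>
            cases h6 : PySem.List.pyGet? c2 1 with
            | none => simp [pairPreB, h3, h4, h5, h6] at hck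
            | some y2 =>
              simp only [pairPreB, h3, h4, h5, h6] at hck
              simp only [rawKeysAt, h1, h2, h3, h4, h5, h6]
              by_cases hx : x1 = x2
              · rw [if_pos hx] at hck ⊢
                intro q hq
                obtain ⟨y, hy, rfl⟩ := List.mem_map.mp hq
                exact (List.all_eq_true.mp hck) y hy
              · rw [if_neg hx] at hck ⊢
                by_cases hy : y1 = y2
                · rw [if_pos hy] at hck ⊢
                  intro q hq
                  obtain ⟨z, hz, rfl⟩ := List.mem_map.mp hq
                  exact (List.all_eq_true.mp hck) z hz
                · rw [if_neg hy]
                  simp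

-- ---- B's counting loop builds the counter of the raw touch list ----
theorem pvRange_shift (n : Int) :
    PySem.List.pyRange 1 n 2 = (PySem.List.pyRange 0 (n - 1) 2).map (· + 1) := by
  rw [PySem.List.pyRange_of_pos 1 n (by omega), PySem.List.pyRange_of_pos 0 (n - 1) (by omega)]
  rw [List.map_map]
  have hc : (if (1 : Int) < n then ((n - 1 + 2 - 1) / 2).toNat else 0) =
      (if (0 : Int) < n - 1 then ((n - 1 - 0 + 2 - 1) / 2).toNat else 0) := by
    by_cases h : (1 : Int) < n
    · rw [if_pos h, if_pos (by omega)]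
      norm_num
    · rw [if_neg h, if_neg (by omega)]
  rw [← hc]
  apply List.map_congr_left
  intro k _
  simp only [Function.comp_apply]
  ring

theorem pvCountB_shifted (co : List (List Int)) (t : PySem.Dict (Int × Int) Int) (k : Int) :
    pvCountB co t (k + 1) = (rawKeysAt co k).foldl pvBumpB t := by
  have he : k + 1 - 1 = k := by ring
  cases h1 : PySem.List.pyGet? co k with
  | none => simp only [pvCountB, rawKeysAt, he, h1, List.foldl_nil]
  | some c1 =>
    cases h2 : PySem.List.pyGet? co (k + 1) with
    | none => simp only [pvCountB, rawKeysAt, he, h1, h2, List.foldl_nil]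
    | some c2 =>
      cases h3 : PySem.List.pyGet? c1 0 with
      | none => simp only [pvCountB, rawKeysAt, he, h1, h2, h3, List.foldl_nil]
      | some x1 =>
        cases h4 : PySem.List.pyGet? c1 1 with
        | none => simp only [pvCountB, rawKeysAt, he, h1, h2, h3, h4, List.foldl_nil]
        | some y1 =>
          cases h5 : PySem.List.pyGet? c2 0 with
          | none => simp only [pvCountB, rawKeysAt, he, h1, h2, h3, h4, h5, List.foldl_nil]
          | some x2 =>
            cases h6 : PySem.List.pyGet? c2 1 with
            | none => simp only [pvCountB, rawKeysAt, he, h1, h2, h3, h4, h5, h6, List.foldl_nil]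
            | some y2 =>
              simp only [pvCountB, rawKeysAt, he, h1, h2, h3, h4, h5, h6]
              by_cases hx : x1 = x2
              · rw [if_pos hx, if_pos hx, List.foldl_map]
              · rw [if_neg hx, if_neg hx]
                by_cases hy : y1 = y2
                · rw [if_pos hy, if_pos hy, List.foldl_map]
                · rw [if_neg hy, if_neg hy, List.foldl_nil]

theorem pvHits_eq (co : List (List Int)) :
    (PySem.List.pyRange 1 (PySem.List.len co) 2).foldl (pvCountB co) PySem.Dict.empty =
      (rawTouchList co).foldl pvBumpB PySem.Dict.empty := by
  rw [pvRange_shift, List.foldl_map]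
  rw [show (PySem.List.len co : Int) - 1 = PySem.List.len co - 1 from rfl]
  rw [rawTouchList, List.foldl_flatMap]
  exact PySem.List.foldl_congr_mem _ _ _ _
    (fun acc k _ => pvCountB_shifted co acc k)

theorem pvItems_hits (xs : List (Int × Int)) :
    (xs.foldl pvBumpB PySem.Dict.empty).items =
      (PySem.Set.ofList xs).map (fun q => (q, (xs.count q : Int))) := by
  have h : pvBumpB = fun (d : PySem.Dict (Int × Int) Int) x => d.insert x (d.getD x 0 + 1) := rfl
  rw [h, PySem.Dict.foldl_insert_getD_add_one_eq_counter, PySem.Dict.items_counter]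

-- ---- B's write pass ----
theorem pvFoldl_const {α β : Type} (l : List β) (f : α → α) (x : α) :
    l.foldl (fun a _ => f a) x = f^[l.length] x := by
  induction l generalizing x with
  | nil => rfl
  | cons b l ih =>
    rw [List.foldl_cons, ih, List.length_cons, Function.iterate_succ_apply]

theorem pvWriteB_eq (g g' : List (List String)) (hsh : shapeG g' = shapeG g)
    (q : Int × Int) (n : Int) (h : cellPreB g q.1 q.2 = true) :
    pvWriteB g' (q, n) =
      pvWriteAt g' (pvKeyB g q.1 q.2)
        (pvNext^[n.toNat] (cellI g' (pvKeyB g q.1 q.2))) := by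
  have h1 : pvWriteB g' (q, n) =
      pvRawUpd (fun c => (PySem.List.pyRange 0 n 1).foldl (fun c' _ => pvNext c') c) g' q.1 q.2 := rfl
  rw [h1, pvRawUpd_eq _ g g' hsh q.1 q.2 h]
  rw [pvFoldl_const, PySem.List.length_pyRange_one]
  simp

-- the number of times the write list L hits the normalised position p
def massOf (g : List (List String)) (L : List ((Int × Int) × Int)) (p : Int × Int) : Nat :=
  (L.map (fun qn => if pvKeyB g qn.1.1 qn.1.2 = p then qn.2.toNat else 0)).sum

theorem pvFoldWrite (g : List (List String)) (L : List ((Int × Int) × Int))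
    (hL : ∀ qn ∈ L, cellPreB g qn.1.1 qn.1.2 = true) :
    ∀ (g' : List (List String)) (f : Int × Int → Nat), shapeG g' = shapeG g →
      (∀ p, 0 ≤ p.1 → 0 ≤ p.2 → cellI g' p = pvNext^[f p] (cellI g p)) →
      (∀ p, 0 ≤ p.1 → 0 ≤ p.2 →
        cellI (L.foldl pvWriteB g') p = pvNext^[massOf g L p + f p] (cellI g p)) ∧
      shapeG (L.foldl pvWriteB g') = shapeG g := by
  induction L with
  | nil =>
    intro g' f hsh hcell
    refine ⟨fun p hp1 hp2 => ?_, hsh⟩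
    simp only [List.foldl_nil, massOf, List.map_nil, List.sum_nil, Nat.zero_add]
    exact hcell p hp1 hp2
  | cons qn L ih =>
    intro g' f hsh hcell
    obtain ⟨q, n⟩ := qn
    have hq : cellPreB g q.1 q.2 = true := hL (q, n) (by simp)
    set p0 := pvKeyB g q.1 q.2 with hp0
    have hr0 : inRangeP g p0 := pvKey_inRange g q.1 q.2 hq
    have hr0' : inRangeP g' p0 := pvInRange_shape g g' hsh p0 hr0
    have hp01 : 0 ≤ p0.1 := hr0'.1
    have hp02 : 0 ≤ p0.2 := hr0'.2.2.1
    have hw : pvWriteB g' (q, n) =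
        pvWriteAt g' p0 (pvNext^[n.toNat] (cellI g' p0)) := pvWriteB_eq g g' hsh q n hq
    have hsh2 : shapeG (pvWriteB g' (q, n)) = shapeG g := by
      rw [hw, pvShape_write, hsh]
    have hcell2 : ∀ p, 0 ≤ p.1 → 0 ≤ p.2 →
        cellI (pvWriteB g' (q, n)) p =
          pvNext^[(if p = p0 then n.toNat + f p else f p)] (cellI g p) := by
      intro p hp1 hp2
      rw [hw, pvCell_write g' p0 hr0' _ p hp1 hp2]
      by_cases hpp : p = p0
      · rw [if_pos hpp, if_pos hpp, hpp, hcell p0 hp01 hp02,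
          ← Function.iterate_add_apply]
      · rw [if_neg hpp, if_neg hpp]
        exact hcell p hp1 hp2
    have := ih (fun r hr => hL r (by simp [hr])) (pvWriteB g' (q, n))
      (fun p => if p = p0 then n.toNat + f p else f p) hsh2 hcell2
    refine ⟨fun p hp1 hp2 => ?_, this.2⟩
    rw [List.foldl_cons, this.1 p hp1 hp2]
    have hmass : massOf g ((q, n) :: L) p + f p =
        massOf g L p + (if p = p0 then n.toNat + f p else f p) := by
      simp only [massOf, List.map_cons, List.sum_cons]
      by_cases hpp : p = p0
      · rw [if_pos hpp, if_pos (by rw [hpp])]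
        omega
      · rw [if_neg hpp, if_neg (fun he => hpp he.symm)]
        omega
    rw [hmass, Nat.add_comm (massOf g L p)]

-- ---- the mass of the counter items is the count in the normalised touch list ----
theorem pvCountP_or (A B : (Int × Int) → Bool) (l : List (Int × Int))
    (hd : ∀ a, ¬(A a = true ∧ B a = true)) :
    l.countP (fun a => A a || B a) = l.countP A + l.countP B := by
  induction l with
  | nil => rfl
  | cons a l ih =>
    simp only [List.countP_cons, ih]
    by_cases hA : A a = true
    · have hB : ¬ B a = true := fun hb => hd a ⟨hA, hb⟩
      simp [hA, hB]
      omega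
    · by_cases hB : B a = true
      · simp [hA, hB]
        omega
      · simp [hA, hB]

theorem pvSum_over_set (g : List (List String)) (p : Int × Int) (xs : List (Int × Int)) :
    ∀ (S : List (Int × Int)), S.Nodup →
      (S.map (fun q => if pvKeyB g q.1 q.2 = p then xs.count q else 0)).sum =
        xs.countP (fun q => decide (pvKeyB g q.1 q.2 = p) && decide (q ∈ S)) := by
  intro S
  induction S with
  | nil =>
    intro _
    simp
  | cons s S ih =>
    intro hnd
    have hs : s ∉ S := (List.nodup_cons.mp hnd).1
    have hnd' : S.Nodup := (List.nodup_cons.mp hnd).2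
    rw [List.map_cons, List.sum_cons, ih hnd']
    have hsplit : xs.countP (fun q => decide (pvKeyB g q.1 q.2 = p) && decide (q ∈ s :: S)) =
        xs.countP (fun q => decide (pvKeyB g q.1 q.2 = p) && decide (q = s)) +
        xs.countP (fun q => decide (pvKeyB g q.1 q.2 = p) && decide (q ∈ S)) := by
      rw [← pvCountP_or _ _ xs (by
        intro a hA
        obtain ⟨h1, h2⟩ := hA
        simp only [Bool.and_eq_true, decide_eq_true_eq] at h1 h2
        exact hs (h1.2 ▸ h2.2))]
      apply List.countP_congr
      intro a _
      simp only [Bool.and_eq_true, decide_eq_true_eq, Bool.or_eq_true, List.mem_cons]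
      constructor
      · rintro ⟨hk, h | h⟩
        · exact Or.inl ⟨hk, h⟩
        · exact Or.inr ⟨hk, h⟩
      · rintro (⟨hk, h⟩ | ⟨hk, h⟩)
        · exact ⟨hk, Or.inl h⟩
        · exact ⟨hk, Or.inr h⟩
    rw [hsplit]
    congr 1
    by_cases hkp : pvKeyB g s.1 s.2 = p
    · rw [if_pos hkp, List.count_eq_countP]
      apply List.countP_congr
      intro a _
      by_cases ha : a = s
      · subst ha
        simp [hkp]
      · simp [ha]
    · rw [if_neg hkp]
      symm
      rw [List.countP_eq_zero]
      intro a _ hcon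
      simp only [Bool.and_eq_true, decide_eq_true_eq] at hcon
      exact hkp (hcon.2 ▸ hcon.1)

theorem pvMass_eq_count (g : List (List String)) (xs : List (Int × Int)) (p : Int × Int) :
    massOf g ((PySem.Set.ofList xs).map (fun q => (q, (xs.count q : Int)))) p =
      (xs.map (fun q => pvKeyB g q.1 q.2)).count p := by
  unfold massOf
  rw [List.map_map]
  have he : ((fun qn : (Int × Int) × Int =>
      if pvKeyB g qn.1.1 qn.1.2 = p then qn.2.toNat else 0) ∘
      (fun q => (q, (xs.count q : Int)))) =
      (fun q : Int × Int => if pvKeyB g q.1 q.2 = p then xs.count q else 0) := by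
    funext q
    simp only [Function.comp_apply]
    by_cases h : pvKeyB g q.1 q.2 = p
    · simp [h]
    · simp [h]
  rw [he, pvSum_over_set g p xs (PySem.Set.ofList xs) (PySem.Set.nodup_ofList xs)]
  rw [List.count_eq_countP, List.countP_map]
  apply List.countP_congr
  intro q hq
  have hmem : q ∈ PySem.Set.ofList xs := (PySem.Set.mem_ofList xs q).mpr hq
  simp only [Function.comp_apply, beq_iff_eq, hmem, decide_true, Bool.and_true,
    decide_eq_true_eq]

-- ---- grids with equal shape and equal cells are equal ----
theorem pvGrid_ext (g1 g2 : List (List String)) (h1 : shapeG g1 = shapeG g2)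
    (hc : ∀ p : Int × Int, 0 ≤ p.1 → 0 ≤ p.2 → cellI g1 p = cellI g2 p) : g1 = g2 := by
  have hl := pvShape_length g2 g1 h1
  apply List.ext_getElem hl
  intro r hr1 hr2
  have hrow : (g1[r]).length = (g2[r]).length := by
    have := pvShape_row g2 g1 h1 r
    rw [List.getD_eq_getElem _ _ hr1, List.getD_eq_getElem _ _ hr2] at this
    exact this
  apply List.ext_getElem hrow
  intro c hc1 hc2
  have := hc ((r : Int), (c : Int)) (by positivity) (by positivity)
  unfold cellI at this
  simp only [PySem.List.pyGetD_natCast] at this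
  rw [List.getD_eq_getElem _ _ hr1, List.getD_eq_getElem _ _ hc1,
      List.getD_eq_getElem _ _ hr2, List.getD_eq_getElem _ _ hc2] at this
  exact this

-- the two default grids coincide
theorem pvDefault_eq :
    ((PySem.List.pyRange 0 10 1).map (fun _ => PySem.List.pyRepeat ["."] 10)) =
      get_empty_diagram_port 9 := by decide

theorem fill_diagram_eq_foldA (co : List (List Int)) (dia : Option (List (List String))) :
    fill_diagram co dia =
      (PySem.List.pyRange 0 (PySem.List.len co - 1) 2).foldl (pvStepA co) (pvGrid dia) := by
  cases dia <;> rfl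

theorem fill_diagram_alt_eq (co : List (List Int)) (dia : Option (List (List String))) :
    fill_diagram_alt co dia =
      ((PySem.List.pyRange 1 (PySem.List.len co) 2).foldl (pvCountB co)
        PySem.Dict.empty).items.foldl pvWriteB (pvGrid dia) := by
  cases dia with
  | none =>
    show _ = _
    unfold fill_diagram_alt pvGrid
    rw [pvDefault_eq]
  | some d => rfl

-- ---- the main equality ----
theorem pv_main (co : List (List Int)) (dia : Option (List (List String)))
    (hpre : Pre_fill_diagram co dia) :
    fill_diagram co dia = fill_diagram_alt co dia := by
  unfold Pre_fill_diagram at hpre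
  have hall := List.all_eq_true.mp hpre
  set g := pvGrid dia with hgdef
  set ks := PySem.List.pyRange 0 (PySem.List.len co - 1) 2 with hksdef
  set TLraw := ks.flatMap (rawKeysAt co) with hTLdef
  have hTLpre : ∀ q ∈ TLraw, cellPreB g q.1 q.2 = true := by
    intro q hq
    obtain ⟨k, hk, hqk⟩ := List.mem_flatMap.mp hq
    exact rawKeysAt_valid g co k (hall k hk) q hqk
  -- A's side
  have hTLn : ks.flatMap (pvKeysAt g co) = TLraw.map (fun q => pvKeyB g q.1 q.2) := by
    rw [hTLdef, List.map_flatMap]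
    rfl
  have hA : fill_diagram co dia =
      (TLraw.map (fun q => pvKeyB g q.1 q.2)).foldl pvApply g := by
    rw [fill_diagram_eq_foldA, ← hgdef, ← hksdef,
      pvFoldA_eq g co ks g rfl (fun k hk => hall k hk), hTLn]
  have hAvalid : ∀ p ∈ TLraw.map (fun q => pvKeyB g q.1 q.2), inRangeP g p := by
    intro p hp
    obtain ⟨q, hq, rfl⟩ := List.mem_map.mp hp
    exact pvKey_inRange g q.1 q.2 (hTLpre q hq)
  -- B's side
  set items := (PySem.Set.ofList TLraw).map (fun q => (q, (TLraw.count q : Int))) with hitems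
  have hB : fill_diagram_alt co dia = items.foldl pvWriteB g := by
    rw [fill_diagram_alt_eq, ← hgdef]
    have h1 : (PySem.List.pyRange 1 (PySem.List.len co) 2).foldl (pvCountB co)
        PySem.Dict.empty = TLraw.foldl pvBumpB PySem.Dict.empty := by
      rw [pvHits_eq co, rawTouchList, ← hksdef, ← hTLdef]
    rw [h1, pvItems_hits, ← hitems]
  have hLpre : ∀ qn ∈ items, cellPreB g qn.1.1 qn.1.2 = true := by
    intro qn hqn
    obtain ⟨q, hq, rfl⟩ := List.mem_map.mp hqn
    exact hTLpre q ((PySem.Set.mem_ofList TLraw q).mp hq)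
  have hBfold := pvFoldWrite g items hLpre g (fun _ => 0) rfl
    (fun p _ _ => rfl)
  -- combine
  rw [hA, hB]
  apply pvGrid_ext
  · rw [pvShape_foldl, hBfold.2]
  · intro p hp1 hp2
    rw [pvFold_cell _ g hAvalid p hp1 hp2, hBfold.1 p hp1 hp2]
    rw [Nat.add_zero, pvMass_eq_count]

-- ===== VERDICT (by name: the statement is the Claim_ definition above) =====
theorem fill_diagram_spec : Claim_equal_fill_diagram := by
  intro co dia _ hpre
  unfold Spec_fill_diagram
  exact pv_main co dia hpre
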